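-- pv_equiv track=rewrite | github.com/OrlandV/auto_put_anime_manga | decode_name.py | points_codes
-- ===== SOURCE A (Python) =====
-- def points_codes(text: str) -> str:
--     """
--     Замена не буквенно-цифровых символов их кодами в формате «&#1;»–«&#127;».
--     :param text: Текст.
--     """
--     text = text.replace('—', '-').replace('…', '...').replace('½', '1/2')
--     points = (list(range(1, 32)) + list(range(33, 36)) + [37] + list(range(40, 48)) +
--               list(range(58, 65)) + list(range(91, 97)) + list(range(123, 128)))
--     text2 = ''
--     for i in range(len(text)):
--         p = ord(text[i])
--         text2 += f'&#{p};' if p in points else text[i]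
--     return text2
-- ===== SOURCE B (Python) =====
-- def points_codes(text: str) -> str:
--     text = text.replace('—', '-').replace('…', '...').replace('½', '1/2')
--
--     def special(p):
--         # encode exactly the codes 1..127 that are not digits/letters and not one of space $ & '
--         if not 1 <= p <= 127:
--             return False
--         return not (48 <= p <= 57 or 65 <= p <= 90 or 97 <= p <= 122 or p in (32, 36, 38, 39))
--
--     out = []
--     i, n = 0, len(text)
--     while i < n:
--         j = i
--         while j < n and not special(ord(text[j])):
--             j += 1
--         out.append(text[i:j])          # copy the whole run of kept characters at once
--         if j < n:
--             out.append(f'&#{ord(text[j])};')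
--             j += 1
--         i = j
--     return ''.join(out)
-- ===== Notes on version B (the rewrite author's own statement) =====
-- stated objective: faster
-- what changed: B drops A's constructed 98-codepoint list and per-character membership scan entirely: it classifies a character by a closed-form complement predicate (codes 1-127 that are not digit/letter/space/$/&/') and sweeps with two pointers, copying whole runs of kept characters at once and joining the pieces, instead of A's index loop with list membership and string concatenation.
import Mathlib
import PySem

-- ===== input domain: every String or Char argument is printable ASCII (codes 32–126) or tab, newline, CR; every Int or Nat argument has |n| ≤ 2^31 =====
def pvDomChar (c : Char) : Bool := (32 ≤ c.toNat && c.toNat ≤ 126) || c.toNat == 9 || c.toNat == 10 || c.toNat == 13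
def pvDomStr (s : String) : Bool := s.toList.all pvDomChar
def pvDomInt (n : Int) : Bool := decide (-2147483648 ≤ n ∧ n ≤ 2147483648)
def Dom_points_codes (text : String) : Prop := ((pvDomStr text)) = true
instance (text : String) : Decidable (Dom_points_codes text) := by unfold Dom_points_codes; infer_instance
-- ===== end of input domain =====

-- B drops A's constructed codepoint list and per-character membership test: it classifies a
-- character by a closed-form complement predicate (codes 1–127 that are not alnum/space/$/&/')
-- and scans with two pointers, copying whole runs of kept characters at once (alternative).

-- shared literal: the three leading .replace calls
def pcPre (text : String) : String :=
  PySem.Str.replace (PySem.Str.replace (PySem.Str.replace text "—" "-") "…" "...") "½" "1/2"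

-- ===== PORT A =====
-- the codepoint list A builds
def pcPoints : List Int :=
  (PySem.List.pyRange 1 32 1) ++ (PySem.List.pyRange 33 36 1) ++ [(37 : Int)] ++
  (PySem.List.pyRange 40 48 1) ++ (PySem.List.pyRange 58 65 1) ++
  (PySem.List.pyRange 91 97 1) ++ (PySem.List.pyRange 123 128 1)

-- loop over indices i in range(len(text)); text2 += f'&#{p};' if p in points else text[i]
def points_codes (text : String) : String :=
  let text := pcPre text
  let points := pcPoints
  let cs := text.toList
  let text2 : List Char :=
    (PySem.List.pyRange 0 (cs.length : Int) 1).foldl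
      (fun text2 i =>
        let c := PySem.List.pyGetD cs i ' '
        let p : Int := (c.toNat : Int)
        text2 ++ (if p ∈ points then ('&' :: '#' :: PySem.Int.toChars p) ++ [';'] else [c]))
      []
  String.ofList text2

-- ===== PORT B =====
-- def special(p): return False unless 1 <= p <= 127; else not (alnum ranges or p in (32,36,38,39))
def pcSpecial (p : Nat) : Bool :=
  if ¬ (1 ≤ p ∧ p ≤ 127) then false
  else ! decide ((48 ≤ p ∧ p ≤ 57) ∨ (65 ≤ p ∧ p ≤ 90) ∨ (97 ≤ p ∧ p ≤ 122) ∨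
                p = 32 ∨ p = 36 ∨ p = 38 ∨ p = 39)

-- inner while: j advances while j < n and not special(ord(text[j]))
def pcRunEnd (cs : List Char) (j : Nat) : Nat :=
  if h : j < cs.length then
    if pcSpecial (cs.get ⟨j, h⟩).toNat = false then pcRunEnd cs (j + 1) else j
  else j
termination_by cs.length - j
decreasing_by omega

theorem pcRunEnd_ge (cs : List Char) (j : Nat) : j ≤ pcRunEnd cs j := by
  fun_induction pcRunEnd cs j with
  | case1 j h hk ih => omega
  | case2 => omega
  | case3 => omega

-- outer while over i, collecting out-pieces: text[i:j], then the entity for text[j]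
def pcLoop (cs : List Char) (i : Nat) : List (List Char) :=
  if h : i < cs.length then
    let j := pcRunEnd cs i
    let piece := PySem.List.slice cs (some (i : Int)) (some (j : Int))
    if hj : j < cs.length then
      piece :: (('&' :: '#' :: PySem.Int.toChars ((cs.get ⟨j, hj⟩).toNat : Int)) ++ [';']) ::
        pcLoop cs (j + 1)
    else [piece]
  else []
termination_by cs.length - i
decreasing_by have := pcRunEnd_ge cs i; omega

-- ''.join(out)
def points_codes_alt (text : String) : String :=
  let text := pcPre text
  String.ofList (List.flatten (pcLoop text.toList 0))

-- ===== PRECONDITION & SPEC =====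
def Spec_points_codes (text : String) (out : String) : Prop := out = points_codes_alt text
instance (text : String) (out : String) : Decidable (Spec_points_codes text out) := by unfold Spec_points_codes; infer_instance

-- ===== CLAIM (what is proved, stated in full; the proofs are below) =====
def Claim_equal_points_codes : Prop := ∀ (text : String), Dom_points_codes text → Spec_points_codes text (points_codes text)

-- ===== LEMMAS AND PROOFS =====

-- A's per-character transformation
def pcEnc (c : Char) : List Char :=
  if ((c.toNat : Int)) ∈ pcPoints then ('&' :: '#' :: PySem.Int.toChars ((c.toNat : Int))) ++ [';']
  else [c]

-- B's complement predicate coincides with membership in A's codepoint list (for every char)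
theorem pcSpecial_iff (p : Nat) : pcSpecial p = true ↔ ((p : Int)) ∈ pcPoints := by
  unfold pcSpecial pcPoints
  by_cases h1 : 1 ≤ p ∧ p ≤ 127
  · rw [if_neg (not_not_intro h1)]
    simp only [List.mem_append, PySem.List.mem_pyRange_one, List.mem_singleton,
      Bool.not_eq_eq_eq_not, Bool.not_true, decide_eq_false_iff_not, not_or, not_and]
    constructor
    · intro h
      push Not at h
      omega
    · intro h
      push Not
      omega
  · rw [if_pos h1]
    simp only [List.mem_append, PySem.List.mem_pyRange_one, List.mem_singleton,
      Bool.false_eq_true, false_iff, not_or]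
    omega

theorem pcEnc_of_special (c : Char) (h : pcSpecial c.toNat = true) :
    pcEnc c = ('&' :: '#' :: PySem.Int.toChars ((c.toNat : Int))) ++ [';'] := by
  simp only [pcEnc, if_pos ((pcSpecial_iff c.toNat).mp h)]

theorem pcEnc_of_kept (c : Char) (h : pcSpecial c.toNat = false) :
    pcEnc c = [c] := by
  have : ¬ ((c.toNat : Int)) ∈ pcPoints := fun hm =>
    by simp [(pcSpecial_iff c.toNat).mpr hm] at h
  simp only [pcEnc, if_neg this]

-- run characterisation: runEnd bounds, and the run's characters all map to themselves
theorem pcRunEnd_le (cs : List Char) (j : Nat) (_hj : j ≤ cs.length) :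
    pcRunEnd cs j ≤ cs.length := by
  fun_induction pcRunEnd cs j with
  | case1 j h hk ih => exact ih (by omega)
  | case2 j h hk => omega
  | case3 j h => omega

theorem pcRunEnd_kept (cs : List Char) (j : Nat) :
    ∀ k (hk : k < cs.length), j ≤ k → k < pcRunEnd cs j → pcSpecial cs[k].toNat = false := by
  fun_induction pcRunEnd cs j with
  | case1 j h hkept ih =>
    intro k hklen hjk hk
    rcases Nat.eq_or_lt_of_le hjk with rfl | hlt
    · simpa [List.get_eq_getElem] using hkept
    · exact ih k hklen hlt hk
  | case2 j h hkept => intro k hklen hjk hk; omega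
  | case3 j h => intro k hklen hjk hk; omega

theorem pcRunEnd_stop (cs : List Char) (j : Nat)
    (h : pcRunEnd cs j < cs.length) :
    pcSpecial (cs[pcRunEnd cs j]'h).toNat = true := by
  fun_induction pcRunEnd cs j with
  | case1 j hj hkept ih => exact ih h
  | case2 j hj hkept => simpa [List.get_eq_getElem] using hkept
  | case3 j hj => omega

-- a segment of kept characters flat-maps to itself
theorem flatMap_enc_kept (seg : List Char) (h : ∀ c ∈ seg, pcSpecial c.toNat = false) :
    seg.flatMap pcEnc = seg := by
  induction seg with
  | nil => rfl
  | cons c t ih =>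
    simp only [List.flatMap_cons, pcEnc_of_kept c (h c (by simp)),
      ih (fun x hx => h x (by simp [hx]))]
    rfl

-- the run segment consists of kept characters only
theorem run_seg_kept (cs : List Char) (i : Nat) (hi : i < cs.length) :
    ∀ c ∈ (cs.drop i).take (pcRunEnd cs i - i), pcSpecial c.toNat = false := by
  intro c hc
  obtain ⟨k, hk, rfl⟩ := List.mem_iff_getElem.mp hc
  have hk2 := hk
  simp only [List.length_take, List.length_drop, lt_min_iff] at hk2
  have hklen : i + k < cs.length := by omega
  have : ((cs.drop i).take (pcRunEnd cs i - i))[k] = cs[i + k]'hklen := by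
    simp [List.getElem_take, List.getElem_drop]
  rw [this]
  exact pcRunEnd_kept cs i (i + k) hklen (by omega) (by omega)

-- split the suffix at the end of the run
theorem drop_split_at_run (cs : List Char) (i j : Nat) (hij : i ≤ j) (_hj : j ≤ cs.length) :
    cs.drop i = (cs.drop i).take (j - i) ++ cs.drop j := by
  conv_lhs => rw [← List.take_append_drop (j - i) (cs.drop i)]
  have hadd : i + (j - i) = j := by omega
  rw [List.drop_drop, hadd]

-- main loop invariant: B's pieces flatten to A's flatMap over the remaining suffix
theorem pcLoop_flatten (cs : List Char) (i : Nat) (hi : i ≤ cs.length) :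
    (pcLoop cs i).flatten = (cs.drop i).flatMap pcEnc := by
  fun_induction pcLoop cs i with
  | case1 i h j piece hj ih =>
    have hji : i ≤ j := pcRunEnd_ge cs i
    have hpiece : piece = (cs.drop i).take (j - i) := by
      simpa [piece] using PySem.List.slice_natCast cs i j
    have hsplit := drop_split_at_run cs i j hji (le_of_lt hj)
    have hdropj : cs.drop j = cs[j]'hj :: cs.drop (j + 1) := List.drop_eq_getElem_cons hj
    rw [List.flatten_cons, List.flatten_cons, ih (by omega), hpiece]
    conv_rhs => rw [hsplit, hdropj]
    rw [List.flatMap_append, List.flatMap_cons,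
      flatMap_enc_kept _ (run_seg_kept cs i h),
      pcEnc_of_special _ (pcRunEnd_stop cs i hj)]
    rfl
  | case2 i h j piece hj =>
    have hji : i ≤ j := pcRunEnd_ge cs i
    have hjle : j ≤ cs.length := pcRunEnd_le cs i (le_of_lt h)
    have hjeq : j = cs.length := by omega
    have hpiece : piece = (cs.drop i).take (j - i) := by
      simpa [piece] using PySem.List.slice_natCast cs i j
    have htake : (cs.drop i).take (j - i) = cs.drop i := by
      apply List.take_of_length_le
      simp only [List.length_drop]
      omega
    rw [List.flatten_cons, List.flatten_nil, List.append_nil, hpiece, htake]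
    rw [flatMap_enc_kept _ (fun c hc => run_seg_kept cs i h c (by rwa [htake]))]
  | case3 i h =>
    rw [List.drop_of_length_le (show cs.length ≤ i by omega)]
    rfl

-- A unrolled to a flatMap
theorem points_codes_eq_flatMap (text : String) :
    points_codes text = String.ofList ((pcPre text).toList.flatMap pcEnc) := by
  unfold points_codes
  simp only []
  rw [PySem.List.foldl_pyRange_zero_pyGetD' (pcPre text).toList ' '
      (fun acc c =>
        acc ++ (if ((c.toNat : Int)) ∈ pcPoints
                then ('&' :: '#' :: PySem.Int.toChars ((c.toNat : Int))) ++ [';'] else [c])) []]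
  rw [PySem.List.foldl_append_eq_flatMap]
  have hfun : (fun c : Char =>
      if ((c.toNat : Int)) ∈ pcPoints
      then ('&' :: '#' :: PySem.Int.toChars ((c.toNat : Int))) ++ [';'] else [c]) = pcEnc := by
    funext c; rfl
  rw [List.nil_append, hfun]

-- ===== VERDICT (by name: the statement is the Claim_ definition above) =====
theorem points_codes_spec : Claim_equal_points_codes := by
  intro text _
  unfold Spec_points_codes points_codes_alt
  rw [points_codes_eq_flatMap]
  simp only []
  rw [pcLoop_flatten (pcPre text).toList 0 (by omega)]
  rfl
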